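-- pv_equiv track=rewrite | github.com/sifedi/site-de-matrice | app.py | produit_matrice_demi_bande_superieure_vecteur
-- ===== SOURCE A (Python) =====
-- def matrice_demi_bande_sup(matrice,n,largeur):
--     m= largeur-1
--     for i in range(n):
--         for j in range(n):
--             if (i>j or j-i>m) and matrice[i][j]!=0:
--                 return False
--     return True
--
-- def produit_matrice_demi_bande_superieure_vecteur(matrice, vecteur, n, largeur):
--     m=largeur-1
--     resultat = [0] * n
--     if not matrice_demi_bande_sup(matrice,n,largeur):
--         raise ValueError("Attention!\nVotre matrice n'est pas une matrice demi-bande supérieure")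
--
--     for i in range(n):
--         for j in range(i, min(i+1+m, n)):
--             resultat[i] += matrice[i][j] * vecteur[j]
--
--     return resultat
-- ===== SOURCE B (Python) =====
-- def produit_matrice_demi_bande_superieure_vecteur(matrice, vecteur, n, largeur):
--     m = largeur - 1
--     resultat = []
--     for i in range(n):
--         s = 0
--         for j in range(n):
--             if i <= j <= i + m:
--                 s += matrice[i][j] * vecteur[j]
--             elif matrice[i][j] != 0:
--                 raise ValueError("Attention!\nVotre matrice n'est pas une matrice demi-bande supérieure")
--         resultat.append(s)
--     return resultat
-- ===== Notes on version B (the rewrite author's own statement) =====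
-- stated objective: simpler
-- what changed: Fuses the separate validation helper and the banded multiplication loop into one row-major pass that builds the result by appending per-row sums, scanning each row once and raising on the first out-of-band nonzero entry.
-- outside the precondition, e.g. on produit_matrice_demi_bande_superieure_vecteur([[0, 0], [0, 0]], [], 2, 0): A returns [0, 0], B returns [0, 0]
import Mathlib
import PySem

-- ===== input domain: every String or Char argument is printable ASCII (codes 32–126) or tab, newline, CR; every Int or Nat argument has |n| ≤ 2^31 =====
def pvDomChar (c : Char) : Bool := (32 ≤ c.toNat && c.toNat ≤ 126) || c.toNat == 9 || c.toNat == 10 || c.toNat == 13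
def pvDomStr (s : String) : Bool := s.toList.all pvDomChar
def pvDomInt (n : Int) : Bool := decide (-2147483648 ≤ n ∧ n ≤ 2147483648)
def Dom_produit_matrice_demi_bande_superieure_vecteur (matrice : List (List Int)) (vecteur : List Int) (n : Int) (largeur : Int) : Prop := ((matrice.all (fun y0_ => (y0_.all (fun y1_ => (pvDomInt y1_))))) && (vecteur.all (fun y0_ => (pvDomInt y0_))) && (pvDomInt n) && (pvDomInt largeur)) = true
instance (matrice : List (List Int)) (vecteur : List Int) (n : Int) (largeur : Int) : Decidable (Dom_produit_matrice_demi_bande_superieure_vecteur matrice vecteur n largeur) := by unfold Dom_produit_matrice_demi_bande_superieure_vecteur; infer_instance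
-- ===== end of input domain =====

-- B fuses A's separate band-validation helper and banded multiplication loop into one
-- row-major pass that appends per-row sums (objective: simpler). Equivalence is about
-- the RETURN value on inputs where A returns (Pre_ excludes the raising/ragged cases).

-- ===== PORT A =====
-- helper matrice_demi_bande_sup: early 'return False' ported as .all
def matrice_demi_bande_sup (matrice : List (List Int)) (n : Int) (largeur : Int) : Bool :=
  let m := largeur - 1
  (PySem.List.pyRange 0 n 1).all (fun i =>
    (PySem.List.pyRange 0 n 1).all (fun j =>
      !(decide (i > j ∨ j - i > m) &&
        (PySem.List.pyGetD (PySem.List.pyGetD matrice i []) j 0 != 0))))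

def produit_matrice_demi_bande_superieure_vecteur (matrice : List (List Int)) (vecteur : List Int) (n : Int) (largeur : Int) : List Int :=
  let m := largeur - 1
  let resultat := List.replicate n.toNat (0 : Int)
  if !(matrice_demi_bande_sup matrice n largeur) then
    resultat  -- Python raises ValueError here; excluded by Pre_
  else
    (PySem.List.pyRange 0 n 1).foldl (fun res i =>
      (PySem.List.pyRange i (min (i + 1 + m) n) 1).foldl (fun res2 j =>
        res2.set i.toNat (PySem.List.pyGetD res2 i 0 +
          PySem.List.pyGetD (PySem.List.pyGetD matrice i []) j 0 *
          PySem.List.pyGetD vecteur j 0)) res) resultat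

-- ===== PORT B =====
def produit_matrice_demi_bande_superieure_vecteur_alt (matrice : List (List Int)) (vecteur : List Int) (n : Int) (largeur : Int) : List Int :=
  let m := largeur - 1
  (PySem.List.pyRange 0 n 1).foldl (fun resultat i =>
    resultat ++ [(PySem.List.pyRange 0 n 1).foldl (fun s j =>
      if i ≤ j ∧ j ≤ i + m then
        s + PySem.List.pyGetD (PySem.List.pyGetD matrice i []) j 0 *
            PySem.List.pyGetD vecteur j 0
      else
        s  -- Python raises ValueError when matrice[i][j] != 0 here; excluded by Pre_
      ) 0]) []

-- ===== PRECONDITION & SPEC =====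
-- Pre_ requires a full n×n matrix, an n-vector, and the upper-band shape (so A returns
-- without raising ValueError/IndexError). It also excludes ragged/short inputs on which
-- A happens never to touch the missing entries and still returns (see claim cites).
def Pre_produit_matrice_demi_bande_superieure_vecteur (matrice : List (List Int)) (vecteur : List Int) (n : Int) (largeur : Int) : Prop :=
  n ≤ (matrice.length : Int) ∧ n ≤ (vecteur.length : Int) ∧
  (∀ row ∈ matrice.take n.toNat, n ≤ (row.length : Int)) ∧
  (∀ i ∈ PySem.List.pyRange 0 n 1, ∀ j ∈ PySem.List.pyRange 0 n 1,
    (i > j ∨ j - i > largeur - 1) →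
      PySem.List.pyGetD (PySem.List.pyGetD matrice i []) j 0 = 0)
instance (matrice : List (List Int)) (vecteur : List Int) (n : Int) (largeur : Int) : Decidable (Pre_produit_matrice_demi_bande_superieure_vecteur matrice vecteur n largeur) := by unfold Pre_produit_matrice_demi_bande_superieure_vecteur; infer_instance

def pvWitness_produit_matrice_demi_bande_superieure_vecteur : List (List Int) × List Int × Int × Int :=
  ([[1, 2], [0, 3]], [1, 1], 2, 2)

def Spec_produit_matrice_demi_bande_superieure_vecteur (matrice : List (List Int)) (vecteur : List Int) (n : Int) (largeur : Int) (out : List Int) : Prop := out = produit_matrice_demi_bande_superieure_vecteur_alt matrice vecteur n largeur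
instance (matrice : List (List Int)) (vecteur : List Int) (n : Int) (largeur : Int) (out : List Int) : Decidable (Spec_produit_matrice_demi_bande_superieure_vecteur matrice vecteur n largeur out) := by unfold Spec_produit_matrice_demi_bande_superieure_vecteur; infer_instance

-- ===== CLAIM (what is proved, stated in full; the proofs are below) =====
def Claim_equal_produit_matrice_demi_bande_superieure_vecteur : Prop := ∀ (matrice : List (List Int)) (vecteur : List Int) (n : Int) (largeur : Int), Dom_produit_matrice_demi_bande_superieure_vecteur matrice vecteur n largeur → Pre_produit_matrice_demi_bande_superieure_vecteur matrice vecteur n largeur → Spec_produit_matrice_demi_bande_superieure_vecteur matrice vecteur n largeur (produit_matrice_demi_bande_superieure_vecteur matrice vecteur n largeur)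

-- ===== LEMMAS AND PROOFS =====

-- A's inner loop: repeated 'resultat[i] += …' collapses to one set of the accumulated sum
theorem pv_inner_fold (f : Int → Int) (l : List Int) :
    ∀ (res : List Int) (i : Int), 0 ≤ i → i.toNat < res.length →
    l.foldl (fun r j => r.set i.toNat (PySem.List.pyGetD r i 0 + f j)) res
      = res.set i.toNat (PySem.List.pyGetD res i 0 + (l.map f).sum) := by
  induction l with
  | nil =>
      intro res i hi hlen
      have : PySem.List.pyGetD res i 0 = res[i.toNat] := by
        exact PySem.List.pyGetD_eq_getElem res 0 hi (by omega)
      simp [this, List.set_getElem_self]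
  | cons j l ih =>
      intro res i hi hlen
      have hset : PySem.List.pyGetD (res.set i.toNat (PySem.List.pyGetD res i 0 + f j)) i 0
          = PySem.List.pyGetD res i 0 + f j := by
        have h1 : (res.set i.toNat (PySem.List.pyGetD res i 0 + f j)).length = res.length := by simp
        rw [PySem.List.pyGetD_eq_getElem _ 0 hi (by rw [h1]; omega)]
        simp
      simp only [List.foldl_cons]
      rw [ih _ i hi (by simpa using hlen), hset, List.set_set]
      simp [add_assoc]

theorem pv_map_range_set {N k : Nat} (_hk : k < N) (f : Nat → Int) (v : Int) :
    ((List.range N).map f).set k v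
      = (List.range N).map (fun i => if i = k then v else f i) := by
  apply List.ext_getElem
  · simp
  · intro i h1 h2
    simp only [List.getElem_set, List.getElem_map, List.getElem_range]
    by_cases h : k = i
    · subst h; simp
    · rw [if_neg h, if_neg (fun hh => h hh.symm)]

-- under Pre_'s band condition, A's validation helper returns true
theorem pv_band_true (matrice : List (List Int)) (n largeur : Int)
    (hband : ∀ i ∈ PySem.List.pyRange 0 n 1, ∀ j ∈ PySem.List.pyRange 0 n 1,
      (i > j ∨ j - i > largeur - 1) →
        PySem.List.pyGetD (PySem.List.pyGetD matrice i []) j 0 = 0) :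
    matrice_demi_bande_sup matrice n largeur = true := by
  unfold matrice_demi_bande_sup
  simp only [List.all_eq_true]
  intro i hi j hj
  by_cases hc : i > j ∨ j - i > largeur - 1
  · have := hband i hi j hj hc
    simp [this]
  · simp
    exact Or.inl (by omega)

-- B's row i sum ranges over exactly A's band slice of row i
theorem pv_filter_band (n m i : Int) (h0 : 0 ≤ i) (hn : i < n) :
    (PySem.List.pyRange 0 n 1).filter (fun j => decide (i ≤ j ∧ j ≤ i + m))
      = PySem.List.pyRange i (min (i + 1 + m) n) 1 := by
  by_cases hm : m < 0
  · rw [List.filter_eq_nil_iff.mpr, Eq.comm, PySem.List.pyRange_one_eq_nil]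
    · omega
    · intro j hj
      simp only [decide_eq_true_eq]
      omega
  · have hsplit1 : PySem.List.pyRange 0 n 1
        = PySem.List.pyRange 0 i 1 ++ PySem.List.pyRange i n 1 :=
      PySem.List.pyRange_one_append 0 i n h0 (by omega)
    have hsplit2 : PySem.List.pyRange i n 1
        = PySem.List.pyRange i (min (i + 1 + m) n) 1 ++ PySem.List.pyRange (min (i + 1 + m) n) n 1 :=
      PySem.List.pyRange_one_append i (min (i + 1 + m) n) n (by omega) (by omega)
    rw [hsplit1, hsplit2, List.filter_append, List.filter_append]
    rw [List.filter_eq_nil_iff.mpr, List.filter_eq_self.mpr, List.filter_eq_nil_iff.mpr]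
    · simp
    · intro j hj
      rw [PySem.List.mem_pyRange_one] at hj
      simp only [decide_eq_true_eq]
      omega
    · intro j hj
      rw [PySem.List.mem_pyRange_one] at hj
      simp only [decide_eq_true_eq]
      omega
    · intro j hj
      rw [PySem.List.mem_pyRange_one] at hj
      simp only [decide_eq_true_eq]
      omega

-- A's outer loop over an all-zero result list fills slot i with its row value
theorem pv_outer_fold (N : Nat) (T : Int → Int) (step : List Int → Nat → List Int)
    (hstep : ∀ res i, res.length = N → i < N →
        step res i = res.set i (PySem.List.pyGetD res (i : Int) 0 + T (i : Int))) :
    ∀ k, k ≤ N → (List.range k).foldl step (List.replicate N (0 : Int))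
      = (List.range N).map (fun i => if i < k then T (i : Int) else 0) := by
  intro k
  induction k with
  | zero =>
      intro _
      simp [List.map_const']
  | succ k ih =>
      intro hk
      rw [List.range_succ, List.foldl_append, ih (by omega), List.foldl_cons, List.foldl_nil]
      rw [hstep _ k (by simp) (by omega)]
      have hget : PySem.List.pyGetD
          ((List.range N).map (fun i => if i < k then T (i : Int) else 0)) (k : Int) 0 = 0 := by
        rw [PySem.List.pyGetD_natCast, List.getD_eq_getElem?_getD]
        simp [Nat.lt_of_succ_le hk]
      rw [hget, pv_map_range_set (by omega)]
      apply List.map_congr_left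
      intro i _
      by_cases h : i = k
      · subst h; simp
      · by_cases h2 : i < k
        · rw [if_neg h, if_pos h2, if_pos (by omega)]
        · rw [if_neg h, if_neg h2, if_neg (by omega)]

-- ===== VERDICT (by name: the statement is the Claim_ definition above) =====
theorem produit_matrice_demi_bande_superieure_vecteur_spec : Claim_equal_produit_matrice_demi_bande_superieure_vecteur := by
  intro matrice vecteur n largeur _dom hpre
  obtain ⟨hm, hv, hrow, hband⟩ := hpre
  unfold Spec_produit_matrice_demi_bande_superieure_vecteur
  unfold produit_matrice_demi_bande_superieure_vecteur produit_matrice_demi_bande_superieure_vecteur_alt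
  rw [pv_band_true matrice n largeur hband]
  simp only [Bool.not_true, Bool.false_eq_true, if_false]
  -- B side: the append-fold is a map of row sums
  rw [PySem.List.foldl_append_singleton_eq_map, List.nil_append]
  -- each of B's row sums equals the sum over A's band slice
  have hBrow : ∀ i ∈ PySem.List.pyRange 0 n 1,
      (PySem.List.pyRange 0 n 1).foldl (fun s j =>
        if i ≤ j ∧ j ≤ i + (largeur - 1) then
          s + PySem.List.pyGetD (PySem.List.pyGetD matrice i []) j 0 * PySem.List.pyGetD vecteur j 0
        else s) 0
      = ((PySem.List.pyRange i (min (i + 1 + (largeur - 1)) n) 1).map (fun j =>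
          PySem.List.pyGetD (PySem.List.pyGetD matrice i []) j 0 * PySem.List.pyGetD vecteur j 0)).sum := by
    intro i hi
    rw [PySem.List.mem_pyRange_one] at hi
    rw [PySem.List.foldl_ite_eq_foldl_filter, pv_filter_band n (largeur - 1) i hi.1 hi.2,
        PySem.List.foldl_add]
    simp
  rw [List.map_congr_left hBrow]
  -- A side: index loop over range n
  rw [PySem.List.pyRange_one 0 n]
  simp only [sub_zero, zero_add, Int.toNat_natCast, List.foldl_map, List.map_map]
  have hA := pv_outer_fold n.toNat
    (fun x => ((PySem.List.pyRange x (min (x + 1 + (largeur - 1)) n) 1).map (fun j =>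
        PySem.List.pyGetD (PySem.List.pyGetD matrice x []) j 0 * PySem.List.pyGetD vecteur j 0)).sum)
    (fun res (k : Nat) =>
      (PySem.List.pyRange (k : Int) (min ((k : Int) + 1 + (largeur - 1)) n) 1).foldl (fun res2 j =>
        res2.set k (PySem.List.pyGetD res2 (k : Int) 0 +
          PySem.List.pyGetD (PySem.List.pyGetD matrice (k : Int) []) j 0 *
          PySem.List.pyGetD vecteur j 0)) res)
    (by
      intro res i hlen hi
      have h := pv_inner_fold (fun j =>
          PySem.List.pyGetD (PySem.List.pyGetD matrice (i : Int) []) j 0 *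
          PySem.List.pyGetD vecteur j 0)
        (PySem.List.pyRange (i : Int) (min ((i : Int) + 1 + (largeur - 1)) n) 1) res (i : Int)
        (by omega) (by rw [hlen]; simpa using hi)
      simpa using h)
    n.toNat le_rfl
  rw [hA]
  apply List.map_congr_left
  intro i hi
  rw [List.mem_range] at hi
  simp [hi]

theorem pv_witness_ok :
    Pre_produit_matrice_demi_bande_superieure_vecteur
      pvWitness_produit_matrice_demi_bande_superieure_vecteur.1
      pvWitness_produit_matrice_demi_bande_superieure_vecteur.2.1
      pvWitness_produit_matrice_demi_bande_superieure_vecteur.2.2.1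
      pvWitness_produit_matrice_demi_bande_superieure_vecteur.2.2.2 := by
  decide
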